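-- pv_equiv track=rewrite | github.com/Aneetej/HackMIT | exa_lesson_generator.py | _extract_subject_patterns
-- ===== SOURCE A (Python) =====
-- from typing import List, Dict, Any, Optional
--
-- def _extract_subject_patterns(summaries: List[str]) -> dict:
--     """Extract subject-specific patterns from summaries"""
--     subjects = ["algebra", "geometry", "calculus", "statistics", "trigonometry"]
--     patterns = {}
--
--     for subject in subjects:
--         subject_mentions = []
--         for summary in summaries:
--             if subject in summary.lower():
--                 subject_mentions.append(summary)
--
--         if subject_mentions:
--             patterns[subject] = len(subject_mentions)
--
--     return patterns
-- ===== SOURCE B (Python) =====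
-- def _extract_subject_patterns(summaries):
--     """Extract subject-specific patterns from summaries"""
--     subjects = ["algebra", "geometry", "calculus", "statistics", "trigonometry"]
--
--     def count(chunk):
--         # divide and conquer: leaves map one summary to {subject: 1}, halves merge by summing
--         if len(chunk) <= 1:
--             if not chunk:
--                 return {}
--             low = chunk[0].lower()
--             return {s: 1 for s in subjects if s in low}
--         mid = len(chunk) // 2
--         left = count(chunk[:mid])
--         for k, v in count(chunk[mid:]).items():
--             left[k] = left.get(k, 0) + v
--         return left
--
--     total = count(summaries)
--     return {s: total[s] for s in subjects if s in total}
-- ===== Notes on version B (the rewrite author's own statement) =====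
-- stated objective: alternative
-- what changed: Replaces A's per-subject scan-and-collect (build the list of matching summaries for each subject, then take its length) with a divide-and-conquer map-reduce: leaves map a single summary to a {subject: 1} dict, halves are merged by summing counts, and a final projection in fixed subject order drops zero counts.
import Mathlib
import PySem

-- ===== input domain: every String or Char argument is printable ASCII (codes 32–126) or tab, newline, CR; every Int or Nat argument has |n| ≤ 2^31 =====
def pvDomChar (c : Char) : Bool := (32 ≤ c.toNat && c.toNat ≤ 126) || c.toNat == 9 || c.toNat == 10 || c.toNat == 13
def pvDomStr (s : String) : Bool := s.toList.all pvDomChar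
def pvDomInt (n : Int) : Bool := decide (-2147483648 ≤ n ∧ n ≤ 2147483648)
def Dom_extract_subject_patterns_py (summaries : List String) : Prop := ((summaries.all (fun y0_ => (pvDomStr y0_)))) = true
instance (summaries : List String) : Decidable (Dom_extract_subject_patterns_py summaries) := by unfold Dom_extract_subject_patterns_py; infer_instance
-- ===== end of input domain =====

-- B replaces A's per-subject scan-and-collect with a divide-and-conquer map-reduce (leaf dicts
-- {subject: 1} merged by summing, zeros dropped by a final projection in subject order);
-- objective: alternative decomposition, same return value.

-- ===== PORT A =====
def pvSubjects : List String := ["algebra", "geometry", "calculus", "statistics", "trigonometry"]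

-- patterns is a dict whose keys (the five distinct subject literals) are each inserted at most
-- once, in loop order, so insertion-order dict = plain list append of fresh keys.
def extract_subject_patterns_py (summaries : List String) : List (String × Int) :=
  pvSubjects.foldl (fun patterns subject =>
    let subject_mentions := summaries.foldl (fun acc summary =>
      if PySem.Str.isIn subject (PySem.Str.lower summary) then acc ++ [summary] else acc) []
    if subject_mentions.isEmpty then patterns
    else patterns ++ [(subject, (subject_mentions.length : Int))]) []

-- ===== PORT B =====
-- the merge loop 'for k, v in right.items(): left[k] = left.get(k, 0) + v'
def pvMerge (left : PySem.Dict String Int) (right : PySem.Dict String Int) : PySem.Dict String Int :=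
  right.items.foldl (fun d kv => d.insert kv.1 (d.getD kv.1 0 + kv.2)) left

-- the inner recursive helper 'count(chunk)'
def pvCount (chunk : List String) : PySem.Dict String Int :=
  if h : chunk.length ≤ 1 then
    match chunk with
    | [] => PySem.Dict.empty
    | t :: _ =>
      -- '{s: 1 for s in subjects if s in low}'
      (pvSubjects.filter (fun s => PySem.Str.isIn s (PySem.Str.lower t))).foldl
        (fun d s => d.insert s 1) PySem.Dict.empty
  else
    pvMerge (pvCount (chunk.take (chunk.length / 2))) (pvCount (chunk.drop (chunk.length / 2)))
termination_by chunk.length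
decreasing_by
  · simp only [List.length_take]; omega
  · simp only [List.length_drop]; omega

-- '{s: total[s] for s in subjects if s in total}' (fresh distinct keys: dict = appended pairs)
def extract_subject_patterns_py_alt (summaries : List String) : List (String × Int) :=
  let total := pvCount summaries
  pvSubjects.foldl (fun acc s =>
    match total.get? s with
    | some v => acc ++ [(s, v)]
    | none => acc) []

-- ===== PRECONDITION & SPEC =====
def Spec_extract_subject_patterns_py (summaries : List String) (out : List (String × Int)) : Prop := out = extract_subject_patterns_py_alt summaries
instance (summaries : List String) (out : List (String × Int)) : Decidable (Spec_extract_subject_patterns_py summaries out) := by unfold Spec_extract_subject_patterns_py; infer_instance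

-- ===== CLAIM (what is proved, stated in full; the proofs are below) =====
def Claim_equal_extract_subject_patterns_py : Prop := ∀ (summaries : List String), Dom_extract_subject_patterns_py summaries → Spec_extract_subject_patterns_py summaries (extract_subject_patterns_py summaries)

-- ===== LEMMAS AND PROOFS =====

-- number of summaries mentioning subject s
def pvCnt (s : String) (l : List String) : Int :=
  ((l.filter (fun sm => PySem.Str.isIn s (PySem.Str.lower sm))).length : Int)

-- intended lookup behaviour of count(chunk)
def pvG (l : List String) (s : String) : Option Int :=
  if s ∈ pvSubjects ∧ pvCnt s l ≠ 0 then some (pvCnt s l) else none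

theorem pvA_mentions (s : String) (l : List String) :
    l.foldl (fun acc summary =>
      if PySem.Str.isIn s (PySem.Str.lower summary) then acc ++ [summary] else acc) ([] : List String)
    = l.filter (fun sm => PySem.Str.isIn s (PySem.Str.lower sm)) := by
  simpa using PySem.List.foldl_append_if_eq_filter
    (p := fun sm => PySem.Str.isIn s (PySem.Str.lower sm)) (l := l) (acc := ([] : List String))

theorem pvA_eq (summaries : List String) :
    extract_subject_patterns_py summaries
    = (pvSubjects.filter (fun s => pvCnt s summaries ≠ 0)).map
        (fun s => (s, pvCnt s summaries)) := by
  unfold extract_subject_patterns_py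
  have hf : (fun (patterns : List (String × Int)) (subject : String) =>
      let subject_mentions := summaries.foldl (fun acc summary =>
        if PySem.Str.isIn subject (PySem.Str.lower summary) then acc ++ [summary] else acc) []
      if subject_mentions.isEmpty then patterns
      else patterns ++ [(subject, (subject_mentions.length : Int))])
    = (fun (patterns : List (String × Int)) (subject : String) =>
      let m := summaries.filter (fun sm => PySem.Str.isIn subject (PySem.Str.lower sm))
      if m.isEmpty then patterns else patterns ++ [(subject, (m.length : Int))]) := by
    funext patterns subject
    simp only [pvA_mentions]
  rw [hf]
  have key : ∀ (subs : List String) (acc : List (String × Int)),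
      subs.foldl (fun (patterns : List (String × Int)) (subject : String) =>
        let m := summaries.filter (fun sm => PySem.Str.isIn subject (PySem.Str.lower sm))
        if m.isEmpty then patterns else patterns ++ [(subject, (m.length : Int))]) acc
      = acc ++ (subs.filter (fun s => pvCnt s summaries ≠ 0)).map
          (fun s => (s, pvCnt s summaries)) := by
    intro subs
    induction subs with
    | nil => simp
    | cons x xs ih =>
      intro acc
      rw [List.foldl_cons]
      by_cases h : pvCnt x summaries = 0
      · have he : (summaries.filter (fun sm => PySem.Str.isIn x (PySem.Str.lower sm))).isEmpty = true := by
          rw [List.isEmpty_iff_length_eq_zero]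
          unfold pvCnt at h; omega
        have hq : ¬ (decide (pvCnt x summaries ≠ 0) = true) := by simp [h]
        rw [List.filter_cons_of_neg (by simpa using hq)]
        simp only [he, if_true]
        exact ih acc
      · have he : (summaries.filter (fun sm => PySem.Str.isIn x (PySem.Str.lower sm))).isEmpty = false := by
          rw [List.isEmpty_eq_false_iff, ← List.length_pos_iff]
          unfold pvCnt at h; omega
        rw [List.filter_cons_of_pos (by simpa using h)]
        simp only [he, if_false, Bool.false_eq_true]
        rw [ih]
        simp [pvCnt]
  simpa using key pvSubjects []

-- the leaf dict comprehension: inserting 1 for every key of ks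
theorem pvLeaf_get? (ks : List String) (d : PySem.Dict String Int) (x : String) :
    (ks.foldl (fun d s => d.insert s 1) d).get? x
    = if x ∈ ks then some 1 else d.get? x := by
  induction ks generalizing d with
  | nil => simp
  | cons k ks ih =>
    rw [List.foldl_cons, ih]
    by_cases hx : x ∈ ks
    · simp [hx]
    · by_cases hk : x = k
      · subst hk; simp [hx, PySem.Dict.get?_insert_self]
      · simp [hx, hk, PySem.Dict.get?_insert_of_ne d 1 hk]

-- the merge loop, lookup-wise, for an items list with distinct keys
theorem pvMerge_aux (ps : List (String × Int)) (l : PySem.Dict String Int)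
    (h : (ps.map Prod.fst).Nodup) (s : String) :
    (ps.foldl (fun d kv => d.insert kv.1 (d.getD kv.1 0 + kv.2)) l).get? s
    = match ps.find? (fun kv => kv.1 == s) with
      | some kv => some (l.getD s 0 + kv.2)
      | none => l.get? s := by
  induction ps generalizing l with
  | nil => simp
  | cons kv ps ih =>
    obtain ⟨k, v⟩ := kv
    simp only [List.map_cons, List.nodup_cons] at h
    rw [List.foldl_cons, ih _ h.2]
    by_cases hk : s = k
    · subst hk
      have hfind : ps.find? (fun kv => kv.1 == s) = none := by
        rw [List.find?_eq_none]
        intro kv hkv hbeq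
        have hks : kv.1 = s := by simpa using hbeq
        exact absurd (hks ▸ List.mem_map_of_mem hkv) h.1
      simp [hfind, PySem.Dict.get?_insert_self]
    · have hne : ¬ ((k, v).1 == s) = true := by
        simp only [beq_iff_eq]; exact fun he => hk he.symm
      have hfc : List.find? (fun kv : String × Int => kv.1 == s) ((k, v) :: ps)
          = List.find? (fun kv => kv.1 == s) ps := List.find?_cons_of_neg hne
      rw [hfc]
      have h1 : (l.insert k (l.getD k 0 + v)).getD s 0 = l.getD s 0 :=
        PySem.Dict.getD_insert_of_ne l _ 0 hk
      have h2 : (l.insert k (l.getD k 0 + v)).get? s = l.get? s :=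
        PySem.Dict.get?_insert_of_ne l _ hk
      cases hf : ps.find? (fun kv => kv.1 == s) <;> simp [h1, h2]

theorem pvCnt_nonneg (s : String) (l : List String) : 0 ≤ pvCnt s l := by
  unfold pvCnt; positivity

theorem pvCnt_split (s : String) (l : List String) (n : Nat) :
    pvCnt s l = pvCnt s (l.take n) + pvCnt s (l.drop n) := by
  conv_lhs => rw [← List.take_append_drop n l]
  unfold pvCnt
  rw [List.filter_append, List.length_append]
  push_cast; ring

-- main invariant of count(chunk): distinct keys, and lookups are the nonzero counts on subjects
theorem pvCount_spec (chunk : List String) :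
    (pvCount chunk).keys.Nodup ∧ ∀ s, (pvCount chunk).get? s = pvG chunk s := by
  induction chunk using pvCount.induct with
  | case1 h1 h2 =>
    constructor
    · simp [pvCount, PySem.Dict.keys_empty]
    · intro s
      simp [pvCount, pvG, pvCnt]
  | case2 t rest h1 h2 =>
    rw [pvCount, dif_pos h1]
    constructor
    · exact PySem.Dict.nodup_keys_foldl_insert _ _ _ (by simp [PySem.Dict.keys_empty])
    · intro s
      rw [pvLeaf_get?]
      have hlen : rest = [] := by
        simp only [List.length_cons] at h1
        exact List.length_eq_zero_iff.mp (by omega)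
      subst hlen
      cases hin : PySem.Chars.isIn s.toList (PySem.Chars.lower t.toList) <;>
        by_cases hs : s ∈ pvSubjects <;>
        simp [pvG, pvCnt, List.filter, List.mem_filter, PySem.Str.isIn, PySem.Str.lower, hin, hs]
  | case3 chunk h ihl ihr =>
    rw [pvCount, dif_neg h]
    obtain ⟨hndl, hgl⟩ := ihl
    obtain ⟨hndr, hgr⟩ := ihr
    have hkeys : (pvMerge (pvCount (chunk.take (chunk.length / 2)))
        (pvCount (chunk.drop (chunk.length / 2)))).keys.Nodup := by
      unfold pvMerge
      exact PySem.Dict.nodup_keys_foldl_insert_key _ _ _ _ hndl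
    refine ⟨hkeys, ?_⟩
    intro s
    unfold pvMerge
    rw [pvMerge_aux _ _ hndr s]
    have hsplit := pvCnt_split s chunk (chunk.length / 2)
    set L := chunk.take (chunk.length / 2)
    set R := chunk.drop (chunk.length / 2)
    have hnnL := pvCnt_nonneg s L
    have hnnR := pvCnt_nonneg s R
    cases hf : (pvCount R).items.find? (fun kv => kv.1 == s) with
    | none =>
      -- s not a key of the right dict: right lookup is none
      have hrnone : (pvCount R).get? s = none := by
        rw [PySem.Dict.get?_eq_none_iff_not_mem_keys]
        intro hmem
        obtain ⟨⟨k, v⟩, hkv, hk⟩ := List.mem_map.mp hmem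
        have := List.find?_eq_none.mp hf _ hkv
        simp only [beq_iff_eq] at this
        exact this hk
      have hR0 : ¬ (s ∈ pvSubjects ∧ pvCnt s R ≠ 0) := by
        intro hc
        rw [hgr s] at hrnone
        simp [pvG, hc] at hrnone
      rw [hgl s]
      unfold pvG
      by_cases hs : s ∈ pvSubjects
      · have hR : pvCnt s R = 0 := by tauto
        rw [hsplit, hR]
        simp
      · simp [hs]
    | some kv =>
      have hkvmem := List.find?_some hf
      have hkeq : kv.1 = s := by simpa using hkvmem
      have hitems : (s, kv.2) ∈ (pvCount R).items := by
        have := List.mem_of_find?_eq_some hf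
        rwa [← hkeq, Prod.mk.eta]
      have hrget : (pvCount R).get? s = some kv.2 :=
        PySem.Dict.get?_of_mem_items _ hitems hndr
      rw [hgr s] at hrget
      unfold pvG at hrget
      split_ifs at hrget with hc
      · -- kv.2 = pvCnt s R ≠ 0, s ∈ subjects
        have hv : kv.2 = pvCnt s R := by injection hrget with hh; omega
        have hLval : (pvCount L).getD s 0 = pvCnt s L := by
          rw [PySem.Dict.getD_eq_get?_getD, hgl s]
          unfold pvG
          split_ifs with hcl
          · simp
          · have : pvCnt s L = 0 := by tauto
            simp [this]
        rw [hLval]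
        show some (pvCnt s L + kv.2) = pvG chunk s
        rw [hv]
        unfold pvG
        have hne : pvCnt s chunk ≠ 0 := by omega
        rw [if_pos ⟨hc.1, hne⟩, hsplit]

theorem pvB_eq (summaries : List String) :
    extract_subject_patterns_py_alt summaries
    = (pvSubjects.filter (fun s => pvCnt s summaries ≠ 0)).map
        (fun s => (s, pvCnt s summaries)) := by
  unfold extract_subject_patterns_py_alt
  obtain ⟨-, hg⟩ := pvCount_spec summaries
  have hcongr : pvSubjects.foldl (fun acc s =>
      match (pvCount summaries).get? s with
      | some v => acc ++ [(s, v)]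
      | none => acc) []
    = pvSubjects.foldl (fun acc s =>
      if pvCnt s summaries ≠ 0 then acc ++ [(s, pvCnt s summaries)] else acc) [] := by
    apply PySem.List.foldl_congr_mem
    intro acc s hs
    rw [hg s]
    unfold pvG
    by_cases hc : pvCnt s summaries ≠ 0
    · simp [hs, hc]
    · simp [hs, hc]
  rw [hcongr]
  simpa using PySem.List.foldl_append_ite (p := fun s => pvCnt s summaries ≠ 0)
    (f := fun s => (s, pvCnt s summaries)) (l := pvSubjects) (acc := [])

-- ===== VERDICT (by name: the statement is the Claim_ definition above) =====
theorem extract_subject_patterns_py_spec : Claim_equal_extract_subject_patterns_py := by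
  intro summaries _
  unfold Spec_extract_subject_patterns_py
  rw [pvA_eq, pvB_eq]
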